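-- pv_equiv track=rewrite | github.com/harshakreox/ghostQA | backend/app/agent/brain/decision_engine.py | _heuristic_error_handler
-- ===== SOURCE A (Python) =====
-- from typing import Any, Dict, List, Optional, Tuple
--
-- def _heuristic_error_handler(error_message: str) -> Optional[Dict[str, Any]]:
--     """Generate heuristic error handling"""
--     error_lower = error_message.lower()
--
--     if 'required' in error_lower:
--         return {
--             "error_type": "validation",
--             "recovery_action": "fill_required_fields",
--             "field_hint": None
--         }
--
--     if 'password' in error_lower and any(x in error_lower for x in ['short', 'weak', 'length']):
--         return {
--             "error_type": "validation",
--             "recovery_action": "use_stronger_password",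
--             "field_hint": "password"
--         }
--
--     if 'email' in error_lower and any(x in error_lower for x in ['invalid', 'format', 'valid']):
--         return {
--             "error_type": "validation",
--             "recovery_action": "use_valid_email",
--             "field_hint": "email"
--         }
--
--     if any(x in error_lower for x in ['exists', 'taken', 'registered']):
--         return {
--             "error_type": "conflict",
--             "recovery_action": "use_different_value",
--             "field_hint": None
--         }
--
--     if any(x in error_lower for x in ['timeout', 'timed out']):
--         return {
--             "error_type": "timeout",
--             "recovery_action": "retry_with_wait",
--             "field_hint": None
--         }
--
--     return None
-- ===== SOURCE B (Python) =====
-- from typing import Any, Dict, List, Optional, Tuple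
--
-- # Each trigger keyword maps to (rule priority, optional guard keyword that must also appear).
-- _TRIGGERS: Dict[str, Tuple[int, Optional[str]]] = {
--     'required': (0, None),
--     'short': (1, 'password'), 'weak': (1, 'password'), 'length': (1, 'password'),
--     'invalid': (2, 'email'), 'format': (2, 'email'), 'valid': (2, 'email'),
--     'exists': (3, None), 'taken': (3, None), 'registered': (3, None),
--     'timeout': (4, None), 'timed out': (4, None),
-- }
--
-- _RESULTS: List[Dict[str, Any]] = [
--     {"error_type": "validation", "recovery_action": "fill_required_fields", "field_hint": None},
--     {"error_type": "validation", "recovery_action": "use_stronger_password", "field_hint": "password"},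
--     {"error_type": "validation", "recovery_action": "use_valid_email", "field_hint": "email"},
--     {"error_type": "conflict", "recovery_action": "use_different_value", "field_hint": None},
--     {"error_type": "timeout", "recovery_action": "retry_with_wait", "field_hint": None},
-- ]
--
-- def _heuristic_error_handler(error_message: str) -> Optional[Dict[str, Any]]:
--     s = error_message.lower()
--     best: Optional[int] = None
--     for kw, (prio, guard) in _TRIGGERS.items():
--         if kw in s and (guard is None or guard in s) and (best is None or prio < best):
--             best = prio
--     return dict(_RESULTS[best]) if best is not None else None
-- ===== Notes on version B (the rewrite author's own statement) =====
-- stated objective: alternative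
-- what changed: Instead of a sequential if-chain of rules, B maps each trigger keyword (with an optional guard keyword for the conjunctive rules) to a rule priority, takes the minimum priority among satisfied triggers in one fold, and indexes the result table with it.
import Mathlib
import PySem

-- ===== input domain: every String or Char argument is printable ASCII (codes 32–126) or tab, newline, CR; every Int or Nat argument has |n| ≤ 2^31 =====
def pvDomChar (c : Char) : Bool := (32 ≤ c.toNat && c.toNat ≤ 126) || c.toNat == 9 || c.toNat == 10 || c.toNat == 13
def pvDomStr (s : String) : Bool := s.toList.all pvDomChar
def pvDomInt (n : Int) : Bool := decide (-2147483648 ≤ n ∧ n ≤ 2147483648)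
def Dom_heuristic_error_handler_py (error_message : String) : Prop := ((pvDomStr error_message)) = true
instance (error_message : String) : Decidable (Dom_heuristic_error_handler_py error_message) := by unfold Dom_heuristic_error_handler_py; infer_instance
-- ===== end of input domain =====

-- B replaces the if-chain with a guarded keyword→priority map and a min-priority fold (alternative decomposition); same results.

-- ===== PORT A =====
-- literal transliteration of A's if-chain; 'x in s' = PySem.Str.isIn, dicts = assoc lists
def heuristic_error_handler_py (error_message : String) : Option (List (String × Option String)) :=
  let error_lower := PySem.Str.lower error_message
  if PySem.Str.isIn "required" error_lower then
    some [("error_type", some "validation"), ("recovery_action", some "fill_required_fields"), ("field_hint", none)]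
  else if PySem.Str.isIn "password" error_lower &&
      (["short", "weak", "length"].any fun x => PySem.Str.isIn x error_lower) then
    some [("error_type", some "validation"), ("recovery_action", some "use_stronger_password"), ("field_hint", some "password")]
  else if PySem.Str.isIn "email" error_lower &&
      (["invalid", "format", "valid"].any fun x => PySem.Str.isIn x error_lower) then
    some [("error_type", some "validation"), ("recovery_action", some "use_valid_email"), ("field_hint", some "email")]
  else if ["exists", "taken", "registered"].any fun x => PySem.Str.isIn x error_lower then
    some [("error_type", some "conflict"), ("recovery_action", some "use_different_value"), ("field_hint", none)]
  else if ["timeout", "timed out"].any fun x => PySem.Str.isIn x error_lower then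
    some [("error_type", some "timeout"), ("recovery_action", some "retry_with_wait"), ("field_hint", none)]
  else
    none

-- ===== PORT B =====
-- trigger keyword → (rule priority, optional guard keyword)
def pvTriggers : List (String × Nat × Option String) :=
  [ ("required", 0, none),
    ("short", 1, some "password"), ("weak", 1, some "password"), ("length", 1, some "password"),
    ("invalid", 2, some "email"), ("format", 2, some "email"), ("valid", 2, some "email"),
    ("exists", 3, none), ("taken", 3, none), ("registered", 3, none),
    ("timeout", 4, none), ("timed out", 4, none) ]

def pvResults : List (List (String × Option String)) :=
  [ [("error_type", some "validation"), ("recovery_action", some "fill_required_fields"), ("field_hint", none)],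
    [("error_type", some "validation"), ("recovery_action", some "use_stronger_password"), ("field_hint", some "password")],
    [("error_type", some "validation"), ("recovery_action", some "use_valid_email"), ("field_hint", some "email")],
    [("error_type", some "conflict"), ("recovery_action", some "use_different_value"), ("field_hint", none)],
    [("error_type", some "timeout"), ("recovery_action", some "retry_with_wait"), ("field_hint", none)] ]

-- the fold over the trigger table keeping the smallest priority whose trigger and guard both match
def pvBest (s : String) : Option Nat :=
  pvTriggers.foldl
    (fun best t =>
      if PySem.Str.isIn t.1 s &&
         (match t.2.2 with | none => true | some g => PySem.Str.isIn g s) &&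
         (match best with | none => true | some b => decide (t.2.1 < b)) then
        some t.2.1
      else best)
    none

def heuristic_error_handler_py_alt (error_message : String) : Option (List (String × Option String)) :=
  match pvBest (PySem.Str.lower error_message) with
  | some b => pvResults[b]?
  | none => none

-- ===== PRECONDITION & SPEC =====
def Spec_heuristic_error_handler_py (error_message : String) (out : Option (List (String × Option String))) : Prop := out = heuristic_error_handler_py_alt error_message
instance (error_message : String) (out : Option (List (String × Option String))) : Decidable (Spec_heuristic_error_handler_py error_message out) := by unfold Spec_heuristic_error_handler_py; infer_instance

-- ===== CLAIM (what is proved, stated in full; the proofs are below) =====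
def Claim_equal_heuristic_error_handler_py : Prop := ∀ (error_message : String), Dom_heuristic_error_handler_py error_message → Spec_heuristic_error_handler_py error_message (heuristic_error_handler_py error_message)

-- ===== LEMMAS AND PROOFS =====
-- proof-only helpers: both ports abstracted over the 14 substring tests

def pvBestAbs (ts : List (Bool × Nat × Bool)) : Option Nat :=
  ts.foldl
    (fun best t =>
      if t.1 && t.2.2 && (match best with | none => true | some b => decide (t.2.1 < b)) then
        some t.2.1
      else best)
    none

def pvAbsA (br bs bw bl bi bf bv be btk brg bto btd bpw bem : Bool) : Option (List (String × Option String)) :=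
  if br then
    some [("error_type", some "validation"), ("recovery_action", some "fill_required_fields"), ("field_hint", none)]
  else if bpw && (bs || (bw || (bl || false))) then
    some [("error_type", some "validation"), ("recovery_action", some "use_stronger_password"), ("field_hint", some "password")]
  else if bem && (bi || (bf || (bv || false))) then
    some [("error_type", some "validation"), ("recovery_action", some "use_valid_email"), ("field_hint", some "email")]
  else if be || (btk || (brg || false)) then
    some [("error_type", some "conflict"), ("recovery_action", some "use_different_value"), ("field_hint", none)]
  else if bto || (btd || false) then
    some [("error_type", some "timeout"), ("recovery_action", some "retry_with_wait"), ("field_hint", none)]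
  else
    none

def pvAbsB (br bs bw bl bi bf bv be btk brg bto btd bpw bem : Bool) : Option (List (String × Option String)) :=
  match pvBestAbs
      [ (br, 0, true), (bs, 1, bpw), (bw, 1, bpw), (bl, 1, bpw),
        (bi, 2, bem), (bf, 2, bem), (bv, 2, bem),
        (be, 3, true), (btk, 3, true), (brg, 3, true),
        (bto, 4, true), (btd, 4, true) ] with
  | some b => pvResults[b]?
  | none => none

theorem pvAbs_eq : ∀ (br bs bw bl bi bf bv be btk brg bto btd bpw bem : Bool),
    pvAbsA br bs bw bl bi bf bv be btk brg bto btd bpw bem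
      = pvAbsB br bs bw bl bi bf bv be btk brg bto btd bpw bem := by decide

-- ===== VERDICT (by name: the statement is the Claim_ definition above) =====
set_option maxHeartbeats 2000000 in
theorem heuristic_error_handler_py_spec : Claim_equal_heuristic_error_handler_py := by
  intro s _
  unfold Spec_heuristic_error_handler_py
  exact pvAbs_eq
    (PySem.Str.isIn "required" (PySem.Str.lower s))
    (PySem.Str.isIn "short" (PySem.Str.lower s))
    (PySem.Str.isIn "weak" (PySem.Str.lower s))
    (PySem.Str.isIn "length" (PySem.Str.lower s))
    (PySem.Str.isIn "invalid" (PySem.Str.lower s))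
    (PySem.Str.isIn "format" (PySem.Str.lower s))
    (PySem.Str.isIn "valid" (PySem.Str.lower s))
    (PySem.Str.isIn "exists" (PySem.Str.lower s))
    (PySem.Str.isIn "taken" (PySem.Str.lower s))
    (PySem.Str.isIn "registered" (PySem.Str.lower s))
    (PySem.Str.isIn "timeout" (PySem.Str.lower s))
    (PySem.Str.isIn "timed out" (PySem.Str.lower s))
    (PySem.Str.isIn "password" (PySem.Str.lower s))
    (PySem.Str.isIn "email" (PySem.Str.lower s))
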